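-- pv_equiv track=rewrite | github.com/AaxX92/python | GCD&LCM/GCD_LCM.py | lcm_count
-- ===== SOURCE A (Python) =====
-- def lcm_count(num1,num2,num3):
--     l1 = num1 + num2 + num3
--     l1 = list(set(l1))  #把组合后的列表元素去重
--     t = 1  #t用于存储最终计算的那个因数
--
--     for i in range(len(l1)):  #用列表4中的所有元素逐个去l1,l2,l3中找相同元素的个数。
--         s1 = num1.count(l1[i])
--         s2 = num2.count(l1[i])
--         s3 = num3.count(l1[i])
--         s = [s1,s2,s3]  #把每个列表中找到的元素个数组合为一个新列表
--         x = s.index(max(s))  #找到列表中最大的元素，最小公倍数是找因数在多个中共同出现次数最多的那个，然后相乘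
--         if s[x] != 0:
--             t1 = l1[i] ** s[x]
--             t = t * t1
--     return t
-- ===== SOURCE B (Python) =====
-- def lcm_count(num1, num2, num3):
--     # Worklist loop: strip one distinct value per step by filtering all three
--     # lists; its multiplicity is the length drop. No set(), no .count() scans.
--     a, b, c = num1, num2, num3
--     t = 1
--     while a or b or c:
--         v = a[0] if a else (b[0] if b else c[0])
--         na = [x for x in a if x != v]
--         nb = [x for x in b if x != v]
--         nc = [x for x in c if x != v]
--         t *= v ** max(len(a) - len(na), len(b) - len(nb), len(c) - len(nc))
--         a, b, c = na, nb, nc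
--     return t
-- ===== Notes on version B (the rewrite author's own statement) =====
-- stated objective: alternative
-- what changed: Replaces A's dedup-set plus per-distinct-element triple .count() scans and [s1,s2,s3]/max/index selection with a worklist loop that strips one distinct value per step by filtering all three lists, reading each max multiplicity off the length drops.
import Mathlib
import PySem

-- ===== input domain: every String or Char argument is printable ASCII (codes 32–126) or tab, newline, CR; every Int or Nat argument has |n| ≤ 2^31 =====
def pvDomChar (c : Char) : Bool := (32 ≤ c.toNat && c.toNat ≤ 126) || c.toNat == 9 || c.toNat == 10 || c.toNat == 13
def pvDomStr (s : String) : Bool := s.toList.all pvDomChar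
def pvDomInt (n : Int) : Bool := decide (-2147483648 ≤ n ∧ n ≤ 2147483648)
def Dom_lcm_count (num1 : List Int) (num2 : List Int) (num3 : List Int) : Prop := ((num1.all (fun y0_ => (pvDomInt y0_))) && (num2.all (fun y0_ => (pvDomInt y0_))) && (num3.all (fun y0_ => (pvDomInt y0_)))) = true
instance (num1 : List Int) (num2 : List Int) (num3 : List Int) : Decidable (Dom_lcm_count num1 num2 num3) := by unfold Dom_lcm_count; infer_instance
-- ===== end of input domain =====

-- B replaces A's dedup-set plus per-distinct-element triple .count() scans by a worklist
-- loop that strips one distinct value per step by filtering all three lists, reading each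
-- multiplicity off the length drop (objective: alternative decomposition).

-- ===== PORT A =====
def lcm_count (num1 : List Int) (num2 : List Int) (num3 : List Int) : Int :=
  let l0 := num1 ++ num2 ++ num3
  let l1 := PySem.Set.ofList l0          -- l1 = list(set(l1)); the product below is order-independent
  (PySem.List.pyRange 0 (l1.length : Int) 1).foldl (fun t i =>
    let v := PySem.List.pyGetD l1 i 0
    let s1 : Int := num1.count v
    let s2 : Int := num2.count v
    let s3 : Int := num3.count v
    let s := [s1, s2, s3]
    let x : Nat := (PySem.List.index? s ((PySem.List.max? s (fun y => y)).getD 0)).getD 0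
    let sx := PySem.List.pyGetD s (x : Int) 0
    if sx ≠ 0 then t * v ^ sx.toNat else t) 1

-- ===== PORT B =====
-- Source B's 'v = a[0] if a else (b[0] if b else c[0])'
def pvFirst (a : List Int) (b : List Int) (c : List Int) : Int :=
  if a ≠ [] then a.headD 0 else if b ≠ [] then b.headD 0 else c.headD 0

-- termination helper cited by pvAltLoop below
theorem pvFirst_mem (a : List Int) (b : List Int) (c : List Int)
    (h : ¬(a = [] ∧ b = [] ∧ c = [])) : pvFirst a b c ∈ a ++ b ++ c := by
  match a, b, c with
  | x :: a, b, c => simp [pvFirst]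
  | [], x :: b, c => simp [pvFirst]
  | [], [], x :: c => simp [pvFirst]
  | [], [], [] => exact absurd ⟨rfl, rfl, rfl⟩ h

-- termination helper cited by pvAltLoop below (countP ignores 'attach')
theorem pvCountP_attach (l : List Int) (v : Int) :
    List.countP (fun x : {x // x ∈ l} => x.val != v) l.attach = List.countP (fun x => x != v) l := by
  conv_rhs => rw [← List.attach_map_subtype_val l]
  rw [List.countP_map]
  rfl

-- the 'while a or b or c: …' worklist loop of Source B, with accumulator t
def pvAltLoop (a : List Int) (b : List Int) (c : List Int) (t : Int) : Int :=
  if a = [] ∧ b = [] ∧ c = [] then t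
  else
    pvAltLoop (a.filter (fun x => x != pvFirst a b c)) (b.filter (fun x => x != pvFirst a b c))
      (c.filter (fun x => x != pvFirst a b c))
      (t * (pvFirst a b c) ^ (max (max ((a.length : Int) - ((a.filter (fun x => x != pvFirst a b c)).length : Int))
          ((b.length : Int) - ((b.filter (fun x => x != pvFirst a b c)).length : Int)))
          ((c.length : Int) - ((c.filter (fun x => x != pvFirst a b c)).length : Int))).toNat)
termination_by a.length + b.length + c.length
decreasing_by
  rename_i h
  have hmem := pvFirst_mem a b c h
  have f1 : ∀ (l : List Int), pvFirst a b c ∈ l →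
      l.countP (fun x => x != pvFirst a b c) < l.length := by
    intro l hw
    have := (List.length_filter_lt_length_iff_exists
      (p := fun x => x != pvFirst a b c)).mpr ⟨pvFirst a b c, hw, by simp⟩
    rwa [← List.countP_eq_length_filter] at this
  have g1 : ∀ (l : List Int), l.countP (fun x => x != pvFirst a b c) ≤ l.length :=
    fun l => List.countP_le_length
  simp only [← List.countP_eq_length_filter, List.length_unattach] at *
  rw [pvCountP_attach, pvCountP_attach, pvCountP_attach]
  rcases List.mem_append.mp hmem with hx | h3
  · rcases List.mem_append.mp hx with h1 | h2
    · have := f1 a h1; have := g1 b; have := g1 c; omega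
    · have := f1 b h2; have := g1 a; have := g1 c; omega
  · have := f1 c h3; have := g1 a; have := g1 b; omega

def lcm_count_alt (num1 : List Int) (num2 : List Int) (num3 : List Int) : Int :=
  pvAltLoop num1 num2 num3 1

-- ===== PRECONDITION & SPEC =====
def Spec_lcm_count (num1 : List Int) (num2 : List Int) (num3 : List Int) (out : Int) : Prop := out = lcm_count_alt num1 num2 num3
instance (num1 : List Int) (num2 : List Int) (num3 : List Int) (out : Int) : Decidable (Spec_lcm_count num1 num2 num3 out) := by unfold Spec_lcm_count; infer_instance

-- ===== CLAIM =====
def Claim_equal_lcm_count : Prop := ∀ (num1 : List Int) (num2 : List Int) (num3 : List Int), Dom_lcm_count num1 num2 num3 → Spec_lcm_count num1 num2 num3 (lcm_count num1 num2 num3)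

-- ===== LEMMAS AND PROOFS =====

-- the common value: product over the distinct elements of v ^ (max multiplicity)
def pvE (a b c : List Int) (v : Int) : Nat := max (max (a.count v) (b.count v)) (c.count v)
def pvProd (a b c : List Int) : Int :=
  ((PySem.Set.ofList (a ++ b ++ c)).map (fun v => v ^ pvE a b c v)).prod

-- A's loop body as a function of the element
def pvStep (num1 num2 num3 : List Int) (t v : Int) : Int :=
  let s : List Int := [(num1.count v : Int), (num2.count v : Int), (num3.count v : Int)]
  let x : Nat := (PySem.List.index? s ((PySem.List.max? s (fun y => y)).getD 0)).getD 0
  let sx := PySem.List.pyGetD s (x : Int) 0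
  if sx ≠ 0 then t * v ^ sx.toNat else t

-- A's s[s.index(max(s))] is just max(s)
theorem pvGet_index_self (s : List Int) (m : Int) (hm : m ∈ s) :
    PySem.List.pyGetD s (((PySem.List.index? s m).getD 0 : Nat) : Int) 0 = m := by
  have hsome : (PySem.List.index? s m).isSome := by
    rw [PySem.List.index?_isSome_iff]; exact hm
  obtain ⟨k, hk⟩ := Option.isSome_iff_exists.mp hsome
  obtain ⟨hlt, hs, -⟩ := PySem.List.getElem_of_index?_eq_some hk
  rw [hk]
  simp only [Option.getD_some, PySem.List.pyGetD_natCast]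
  rw [List.getD_eq_getElem _ _ hlt]
  exact hs

theorem pvSx_eq (a b c : Int) :
    PySem.List.pyGetD [a, b, c]
      (((PySem.List.index? [a, b, c] ((PySem.List.max? [a, b, c] (fun y => y)).getD 0)).getD 0 : Nat) : Int) 0
      = max (max a b) c := by
  rw [PySem.List.max?_id_cons]
  simp only [List.foldl_cons, List.foldl_nil, Option.getD_some]
  apply pvGet_index_self
  rcases max_choice (max a b) c with h | h <;> rw [h]
  · rcases max_choice a b with h' | h' <;> rw [h'] <;> simp
  · simp

theorem pvFoldl_mul (l : List Int) (f : Int → Int) (t0 : Int) :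
    l.foldl (fun t v => t * f v) t0 = t0 * (l.map f).prod := by
  induction l generalizing t0 with
  | nil => simp
  | cons x l ih => simp only [List.foldl_cons, List.map_cons, List.prod_cons, ih, mul_assoc]

-- filter commutes with Python's set-of-list (first-occurrence dedup)
theorem pvFilter_ofList (t : List Int) (p : Int → Bool) :
    (PySem.Set.ofList t).filter p = PySem.Set.ofList (t.filter p) := by
  induction t with
  | nil => rfl
  | cons x t ih =>
    rw [PySem.Set.ofList_cons]
    by_cases hx : p x = true
    · rw [List.filter_cons_of_pos hx]
      conv_rhs => rw [List.filter_cons_of_pos hx, PySem.Set.ofList_cons]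
      rw [← ih]
      simp only [PySem.Set.discard, List.filter_filter]
      congr 1
      apply List.filter_congr
      intro y _
      rw [Bool.and_comm]
    · rw [List.filter_cons_of_neg hx]
      conv_rhs => rw [List.filter_cons_of_neg hx]
      rw [← ih]
      simp only [PySem.Set.discard, List.filter_filter]
      apply List.filter_congr
      intro y _
      by_cases hyx : y = x
      · subst hyx; simp [hx]
      · simp [hyx]

theorem pvOfList_head (v : Int) (t : List Int) :
    PySem.Set.ofList (v :: t) = v :: PySem.Set.ofList (t.filter (fun x => x != v)) := by
  rw [PySem.Set.ofList_cons]
  congr 1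
  show (PySem.Set.ofList t).filter (fun y => !(y == v)) = _
  rw [pvFilter_ofList]
  congr 1

-- the length drop of 'filter (≠ v)' is the count of v
theorem pvCount_length (l : List Int) (v : Int) :
    (l.filter (fun x => x != v)).length + l.count v = l.length := by
  rw [← List.countP_eq_length_filter, List.count]
  have h := List.length_eq_countP_add_countP (l := l) (fun x => x == v)
  have : List.countP (fun x => x != v) l
      = List.countP (fun a => decide ¬((a == v) = true)) l := by
    apply List.countP_congr
    intro x _
    by_cases hx : x = v <;> simp [hx]
  omega

-- counts of survivors are unchanged by the filter
theorem pvCount_filter_ne (l : List Int) (v w : Int) (hw : w ≠ v) :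
    (l.filter (fun x => x != v)).count w = l.count w :=
  List.count_filter (by simp [hw])

theorem pvFirst_headD (a : List Int) (b : List Int) (c : List Int)
    (h : ¬(a = [] ∧ b = [] ∧ c = [])) : (a ++ b ++ c).headD 0 = pvFirst a b c := by
  match a, b, c with
  | x :: a, b, c => simp [pvFirst]
  | [], x :: b, c => simp [pvFirst]
  | [], [], x :: c => simp [pvFirst]
  | [], [], [] => exact absurd ⟨rfl, rfl, rfl⟩ h

-- one step of B's loop on the canonical product
theorem pvProd_step (a b c : List Int) (v : Int)
    (hhead : (a ++ b ++ c).headD 0 = v) (hne : a ++ b ++ c ≠ []) :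
    pvProd a b c = v ^ pvE a b c v *
      pvProd (a.filter (fun x => x != v)) (b.filter (fun x => x != v)) (c.filter (fun x => x != v)) := by
  have hcons : a ++ b ++ c = v :: (a ++ b ++ c).tail := by
    cases hcc : a ++ b ++ c with
    | nil => exact absurd hcc hne
    | cons y l =>
      rw [hcc] at hhead
      simp only [List.headD_cons] at hhead
      simp [hhead]
  have hfilter : (a ++ b ++ c).tail.filter (fun x => x != v)
      = a.filter (fun x => x != v) ++ b.filter (fun x => x != v) ++ c.filter (fun x => x != v) := by
    have hstep : (a ++ b ++ c).filter (fun x => x != v)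
        = (v :: (a ++ b ++ c).tail).filter (fun x => x != v) := by rw [← hcons]
    rw [List.filter_cons_of_neg (by simp)] at hstep
    rw [← hstep, List.filter_append, List.filter_append]
  unfold pvProd
  rw [hcons, pvOfList_head, hfilter]
  rw [List.map_cons, List.prod_cons]
  congr 1
  congr 1
  apply List.map_congr_left
  intro w hw
  have hwmem : w ∈ (a.filter (fun x => x != v) ++ b.filter (fun x => x != v) ++ c.filter (fun x => x != v)) :=
    (PySem.Set.mem_ofList _ w).mp hw
  have hwv : w ≠ v := by
    rcases List.mem_append.mp hwmem with h | h3
    · rcases List.mem_append.mp h with h1 | h2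
      · exact (by simpa using (List.mem_filter.mp h1).2)
      · exact (by simpa using (List.mem_filter.mp h2).2)
    · exact (by simpa using (List.mem_filter.mp h3).2)
  unfold pvE
  rw [pvCount_filter_ne a v w hwv, pvCount_filter_ne b v w hwv, pvCount_filter_ne c v w hwv]

-- B's loop computes the canonical product
theorem pvAltLoop_eq (n : Nat) : ∀ (a b c : List Int) (t : Int),
    a.length + b.length + c.length ≤ n → pvAltLoop a b c t = t * pvProd a b c := by
  induction n with
  | zero =>
    intro a b c t h
    have ha : a = [] := by cases a <;> simp_all
    have hb : b = [] := by cases b <;> simp_all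
    have hc : c = [] := by cases c <;> simp_all
    subst ha; subst hb; subst hc
    rw [pvAltLoop]
    simp [pvProd, PySem.Set.ofList]
  | succ n ih =>
    intro a b c t h
    rw [pvAltLoop]
    by_cases hall : a = [] ∧ b = [] ∧ c = []
    · rw [if_pos hall]
      obtain ⟨ha, hb, hc⟩ := hall
      subst ha; subst hb; subst hc
      simp [pvProd, PySem.Set.ofList]
    · rw [if_neg hall]
      have hne : a ++ b ++ c ≠ [] := by
        intro hx
        rcases List.append_eq_nil_iff.mp hx with ⟨hx1, hc⟩
        rcases List.append_eq_nil_iff.mp hx1 with ⟨ha, hb⟩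
        exact hall ⟨ha, hb, hc⟩
      have hhead : (a ++ b ++ c).headD 0 = pvFirst a b c := pvFirst_headD a b c hall
      have hvmem : pvFirst a b c ∈ a ++ b ++ c := pvFirst_mem a b c hall
      have hlen : (a.filter (fun x => x != pvFirst a b c)).length
          + (b.filter (fun x => x != pvFirst a b c)).length
          + (c.filter (fun x => x != pvFirst a b c)).length ≤ n := by
        have h1 := pvCount_length a (pvFirst a b c)
        have h2 := pvCount_length b (pvFirst a b c)
        have h3 := pvCount_length c (pvFirst a b c)
        have hpos : 0 < a.count (pvFirst a b c) + b.count (pvFirst a b c) + c.count (pvFirst a b c) := by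
          rcases List.mem_append.mp hvmem with hx | h3'
          · rcases List.mem_append.mp hx with h1' | h2'
            · have := List.count_pos_iff.mpr h1'; omega
            · have := List.count_pos_iff.mpr h2'; omega
          · have := List.count_pos_iff.mpr h3'; omega
        omega
      rw [ih _ _ _ _ hlen, pvProd_step a b c (pvFirst a b c) hhead hne]
      have hm : (max (max ((a.length : Int) - ((a.filter (fun x => x != pvFirst a b c)).length : Int))
            ((b.length : Int) - ((b.filter (fun x => x != pvFirst a b c)).length : Int)))
            ((c.length : Int) - ((c.filter (fun x => x != pvFirst a b c)).length : Int))).toNat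
          = pvE a b c (pvFirst a b c) := by
        have h1 := pvCount_length a (pvFirst a b c)
        have h2 := pvCount_length b (pvFirst a b c)
        have h3 := pvCount_length c (pvFirst a b c)
        have e1 : (a.length : Int) - ((a.filter (fun x => x != pvFirst a b c)).length : Int)
            = (a.count (pvFirst a b c) : Int) := by omega
        have e2 : (b.length : Int) - ((b.filter (fun x => x != pvFirst a b c)).length : Int)
            = (b.count (pvFirst a b c) : Int) := by omega
        have e3 : (c.length : Int) - ((c.filter (fun x => x != pvFirst a b c)).length : Int)
            = (c.count (pvFirst a b c) : Int) := by omega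
        rw [e1, e2, e3, ← Nat.cast_max, ← Nat.cast_max, Int.toNat_natCast]
        rfl
      rw [hm]
      ring

-- ===== VERDICT =====
theorem lcm_count_spec : Claim_equal_lcm_count := by
  intro num1 num2 num3 _
  unfold Spec_lcm_count lcm_count_alt
  rw [pvAltLoop_eq (num1.length + num2.length + num3.length) num1 num2 num3 1 (le_refl _), one_mul]
  simp only [lcm_count]
  have hA : (PySem.List.pyRange 0 ((PySem.Set.ofList (num1 ++ num2 ++ num3)).length : Int) 1).foldl
      (fun t i => pvStep num1 num2 num3 t (PySem.List.pyGetD (PySem.Set.ofList (num1 ++ num2 ++ num3)) i 0)) 1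
      = (PySem.Set.ofList (num1 ++ num2 ++ num3)).foldl (pvStep num1 num2 num3) 1 :=
    PySem.List.foldl_pyRange_zero_pyGetD' (PySem.Set.ofList (num1 ++ num2 ++ num3)) 0 (pvStep num1 num2 num3) 1
  refine Eq.trans (hA) ?_
  rw [show (PySem.Set.ofList (num1 ++ num2 ++ num3)).foldl (pvStep num1 num2 num3) 1
      = (PySem.Set.ofList (num1 ++ num2 ++ num3)).foldl
          (fun t v => t * v ^ pvE num1 num2 num3 v) 1 from ?_]
  · rw [pvFoldl_mul, one_mul]; rfl
  · apply PySem.List.foldl_congr_mem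
    intro t v hv
    simp only [pvStep]
    have hvmem : v ∈ num1 ++ num2 ++ num3 := (PySem.Set.mem_ofList _ v).mp hv
    rw [pvSx_eq]
    have hcnt : 0 < num1.count v + num2.count v + num3.count v := by
      rcases List.mem_append.mp hvmem with h | h3
      · rcases List.mem_append.mp h with h1 | h2
        · have := List.count_pos_iff.mpr h1; omega
        · have := List.count_pos_iff.mpr h2; omega
      · have := List.count_pos_iff.mpr h3; omega
    have hne : max (max ((num1.count v : Int)) (num2.count v)) (num3.count v) ≠ 0 := by
      intro hz; omega
    rw [if_pos hne]
    congr 1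
    rw [← Nat.cast_max, ← Nat.cast_max, Int.toNat_natCast]
    rfl
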